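-- pv_equiv track=rewrite | github.com/jataware/biome | src/beaker-biome/src/beaker_biome/integrations/ensembl_rest_extraction.py | _convert_path_params
-- ===== SOURCE A (Python) =====
-- from typing import Dict, List, Optional, Tuple
--
-- def _convert_path_params(path: str) -> Tuple[str, List[str]]:
--     """Convert :param style parameters to {param} style for OpenAPI spec."""
--     if not path.startswith('/'):
--         path = '/' + path
--
--     parts = path.split('/')
--     converted_parts = []
--     path_params = []
--
--     for part in parts:
--         if part.startswith(':'):
--             param_name = part[1:].rstrip(':')
--             path_params.append(param_name)
--             converted_parts.append(f'{{{param_name}}}')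
--         else:
--             converted_parts.append(part)
--
--     return '/'.join(converted_parts).replace('//', '/'), path_params
-- ===== SOURCE B (Python) =====
-- from typing import List, Tuple
--
-- def _convert_path_params(path: str) -> Tuple[str, List[str]]:
--     """Convert :param style parameters to {param} style for OpenAPI spec.
--
--     Single left-to-right character scan: a ':' at the start of a segment
--     (position 0 or right after a '/') opens a parameter that runs to the
--     next '/'; everything else is copied through unchanged."""
--     if not path.startswith('/'):
--         path = '/' + path
--
--     out = []
--     params = []
--     i = 0
--     n = len(path)
--     while i < n:
--         c = path[i]
--         if c == ':' and (i == 0 or path[i - 1] == '/'):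
--             j = i + 1
--             while j < n and path[j] != '/':
--                 j += 1
--             name = path[i + 1:j].rstrip(':')
--             params.append(name)
--             out.append('{' + name + '}')
--             i = j
--         else:
--             out.append(c)
--             i += 1
--
--     return ''.join(out).replace('//', '/'), params
-- ===== Notes on version B (the rewrite author's own statement) =====
-- stated objective: alternative
-- what changed: Replaces A's split('/')/loop-over-parts/join pipeline with a single left-to-right character scan that converts a ':'-opened segment in place, with no intermediate parts lists.
import Mathlib
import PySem

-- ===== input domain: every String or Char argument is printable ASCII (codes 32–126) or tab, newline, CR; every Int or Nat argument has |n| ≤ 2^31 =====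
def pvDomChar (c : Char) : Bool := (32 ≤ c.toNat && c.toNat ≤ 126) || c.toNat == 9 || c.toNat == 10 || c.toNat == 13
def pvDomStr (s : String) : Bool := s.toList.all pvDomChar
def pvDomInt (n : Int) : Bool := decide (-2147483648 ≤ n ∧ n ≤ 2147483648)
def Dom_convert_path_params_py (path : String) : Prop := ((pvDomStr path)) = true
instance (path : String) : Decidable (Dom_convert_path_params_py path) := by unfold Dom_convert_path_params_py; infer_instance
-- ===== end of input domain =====

-- B replaces A's split('/')/loop/join pipeline by a single character scan over the raw path; equal return value on every input (A is total).

-- ===== PORT A =====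
-- shared helper: Python's s.rstrip(':') — drop the trailing run of ':' characters (exact)
def rstripColon (cs : List Char) : List Char := (cs.reverse.dropWhile (· == ':')).reverse

-- the body of A's `for part in parts:` loop (appends to converted_parts / path_params)
def stepA (acc : List (List Char) × List String) (part : List Char) : List (List Char) × List String :=
  if PySem.Chars.startswith part [':'] then
    let param_name := rstripColon (part.drop 1)
    (acc.1 ++ ['{' :: (param_name ++ ['}'])], acc.2 ++ [String.ofList param_name])
  else (acc.1 ++ [part], acc.2)

def convert_path_params_py (path : String) : String × List String :=
  let cs := if PySem.Str.startswith path "/" = false then '/' :: path.toList else path.toList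
  let parts := PySem.Chars.splitOn cs ['/']
  let res := parts.foldl stepA ([], [])
  (String.ofList (PySem.Chars.replace (PySem.Chars.join ['/'] res.1) ['/', '/'] ['/']), res.2)

-- ===== PORT B =====
-- Source B's while-loop: one pass, `b` says whether we are at a segment start (i = 0 or previous char '/');
-- the inner `while j < n and path[j] != '/'` loop is takeWhile/dropWhile.
def scanB : List Char → Bool → List Char × List String
  | [], _ => ([], [])
  | c :: rest, atStart =>
    if atStart && (c == ':') then
      let seg := rest.takeWhile (· ≠ '/')
      let rest' := rest.dropWhile (· ≠ '/')
      let name := rstripColon seg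
      let r := scanB rest' false
      ('{' :: (name ++ '}' :: r.1), String.ofList name :: r.2)
    else
      let r := scanB rest (c == '/')
      (c :: r.1, r.2)
termination_by cs _ => cs.length
decreasing_by
  · simpa using Nat.lt_succ_of_le (List.length_dropWhile_le _ _)
  · simp

def convert_path_params_py_alt (path : String) : String × List String :=
  let cs := if PySem.Str.startswith path "/" = false then '/' :: path.toList else path.toList
  let r := scanB cs true
  (String.ofList (PySem.Chars.replace r.1 ['/', '/'] ['/']), r.2)

-- ===== PRECONDITION & SPEC =====
def Spec_convert_path_params_py (path : String) (out : String × List String) : Prop := out = convert_path_params_py_alt path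
instance (path : String) (out : String × List String) : Decidable (Spec_convert_path_params_py path out) := by unfold Spec_convert_path_params_py; infer_instance

-- ===== CLAIM (what is proved, stated in full; the proofs are below) =====
def Claim_equal_convert_path_params_py : Prop := ∀ (path : String), Dom_convert_path_params_py path → Spec_convert_path_params_py path (convert_path_params_py path)

-- ===== LEMMAS AND PROOFS =====

-- split on '/' characterised structurally: head segment, then recurse past the separator
def splitSlash (cs : List Char) : List (List Char) :=
  if h : cs.dropWhile (· ≠ '/') = [] then [cs.takeWhile (· ≠ '/')]
  else cs.takeWhile (· ≠ '/') :: splitSlash ((cs.dropWhile (· ≠ '/')).tail)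
termination_by cs.length
decreasing_by
  have h1 := List.length_dropWhile_le (fun c => c ≠ '/') cs
  have h2 : 0 < (cs.dropWhile (· ≠ '/')).length := List.length_pos_iff.mpr h
  simp only [List.length_tail]
  omega

def consHead (pre : List Char) : List (List Char) → List (List Char)
  | [] => [pre]
  | p :: ps => (pre ++ p) :: ps

def convC (p : List Char) : List Char :=
  if PySem.Chars.startswith p [':'] then '{' :: (rstripColon (p.drop 1) ++ ['}']) else p

def paramC (p : List Char) : Option String :=
  if PySem.Chars.startswith p [':'] then some (String.ofList (rstripColon (p.drop 1))) else none

def outParts : Bool → List (List Char) → List (List Char)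
  | true, ps => ps.map convC
  | false, [] => []
  | false, p :: ps => p :: ps.map convC

def outParams : Bool → List (List Char) → List String
  | true, ps => ps.filterMap paramC
  | false, [] => []
  | false, _ :: ps => ps.filterMap paramC

theorem splitSlash_nil : splitSlash [] = [[]] := by
  rw [splitSlash]; simp

theorem splitSlash_slash (rest : List Char) : splitSlash ('/' :: rest) = [] :: splitSlash rest := by
  rw [splitSlash]; simp

theorem splitSlash_ne_nil (cs : List Char) : splitSlash cs ≠ [] := by
  rw [splitSlash]; split <;> simp

theorem splitSlash_cons_ne (c : Char) (rest : List Char) (hc : c ≠ '/') :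
    splitSlash (c :: rest) = consHead [c] (splitSlash rest) := by
  conv_lhs => rw [splitSlash]
  conv_rhs => rw [splitSlash]
  simp only [List.dropWhile_cons, List.takeWhile_cons, hc, ne_eq, decide_not]
  split
  · split <;> simp [consHead]
  · simp_all

theorem consHead_consHead (a b : List Char) (ps : List (List Char)) :
    consHead a (consHead b ps) = consHead (a ++ b) ps := by
  cases ps <;> simp [consHead]

theorem go_spec (fuel : Nat) : ∀ (l cur : List Char) (acc : List (List Char)), l.length ≤ fuel →
    PySem.Chars.splitOn.go ['/'] fuel l cur acc =
      acc.reverse ++ consHead cur.reverse (splitSlash l) := by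
  induction fuel with
  | zero =>
    intro l cur acc h
    have : l = [] := List.length_eq_zero_iff.mp (Nat.le_zero.mp h)
    subst this
    simp [PySem.Chars.splitOn.go, splitSlash_nil, consHead]
  | succ fuel ih =>
    intro l cur acc h
    cases l with
    | nil => simp [PySem.Chars.splitOn.go, splitSlash_nil, consHead]
    | cons c rest =>
      rw [PySem.Chars.splitOn.go.eq_def]
      by_cases hc : c = '/'
      · subst hc
        simp only [List.isPrefixOf, List.isPrefixOf_nil_left, Bool.and_true, beq_self_eq_true,
          if_true, List.length_cons, List.length_nil, List.drop_succ_cons, List.drop_zero,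
          Nat.zero_add]
        rw [ih rest [] (List.reverse cur :: acc) (Nat.le_of_succ_le_succ h)]
        rw [splitSlash_slash]
        obtain ⟨p, ps, hps⟩ : ∃ p ps, splitSlash rest = p :: ps := by
          cases hsp : splitSlash rest with
          | nil => exact absurd hsp (splitSlash_ne_nil rest)
          | cons p ps => exact ⟨p, ps, rfl⟩
        simp [hps, consHead]
      · have hne : (('/' : Char) == c) = false := by
          simp only [beq_eq_false_iff_ne, ne_eq]
          exact fun h' => absurd h'.symm hc
        simp only [List.isPrefixOf, List.isPrefixOf_nil_left, Bool.and_true, hne,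
          Bool.false_eq_true, if_false]
        rw [ih rest (c :: cur) acc (Nat.le_of_succ_le_succ h)]
        rw [splitSlash_cons_ne c rest hc, consHead_consHead]
        simp [consHead_consHead]

theorem splitOn_eq_splitSlash (cs : List Char) :
    PySem.Chars.splitOn cs ['/'] = splitSlash cs := by
  unfold PySem.Chars.splitOn
  rw [go_spec (cs.length + 1) cs [] [] (Nat.le_succ _)]
  obtain ⟨p, ps, hps⟩ : ∃ p ps, splitSlash cs = p :: ps := by
    cases hsp : splitSlash cs with
    | nil => exact absurd hsp (splitSlash_ne_nil cs)
    | cons p ps => exact ⟨p, ps, rfl⟩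
  simp [hps, consHead]

theorem foldl_stepA (parts : List (List Char)) (acc : List (List Char) × List String) :
    parts.foldl stepA acc = (acc.1 ++ parts.map convC, acc.2 ++ parts.filterMap paramC) := by
  induction parts generalizing acc with
  | nil => simp
  | cons p ps ih =>
    simp only [List.foldl_cons, ih, List.map_cons, List.filterMap_cons]
    by_cases hp : PySem.Chars.startswith p [':']
    · simp [stepA, convC, paramC, hp]
    · simp [stepA, convC, paramC, hp]

theorem startswith_colon (p : List Char) : PySem.Chars.startswith (':' :: p) [':'] = true := by
  simp [PySem.Chars.startswith]

theorem startswith_colon_ne (c : Char) (p : List Char) (h : c ≠ ':') :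
    PySem.Chars.startswith (c :: p) [':'] = false := by
  simp [PySem.Chars.startswith, List.isPrefixOf]
  exact fun h' => absurd h'.symm h

theorem startswith_colon_nil : PySem.Chars.startswith [] [':'] = false := by
  simp [PySem.Chars.startswith]

theorem splitSlash_dest (cs : List Char) : ∃ p ps, splitSlash cs = p :: ps := by
  cases hsp : splitSlash cs with
  | nil => exact absurd hsp (splitSlash_ne_nil cs)
  | cons p ps => exact ⟨p, ps, rfl⟩

theorem join_cons_head (c : Char) (p : List Char) (ps : List (List Char)) :
    PySem.Chars.join ['/'] ((c :: p) :: ps) = c :: PySem.Chars.join ['/'] (p :: ps) := by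
  cases ps with
  | nil => simp [PySem.Chars.join_singleton]
  | cons q qs => simp [PySem.Chars.join_cons_cons]

theorem scan_spec_aux : ∀ (n : Nat) (cs : List Char) (b : Bool), cs.length ≤ n →
    scanB cs b = (PySem.Chars.join ['/'] (outParts b (splitSlash cs)), outParams b (splitSlash cs)) := by
  intro n
  induction n with
  | zero =>
    intro cs b h
    have : cs = [] := List.length_eq_zero_iff.mp (Nat.le_zero.mp h)
    subst this
    cases b <;>
      simp [scanB, splitSlash_nil, outParts, outParams, convC, paramC, startswith_colon_nil,
        PySem.Chars.join_singleton]
  | succ n ih =>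
    intro cs b h
    cases cs with
    | nil =>
      cases b <;>
        simp [scanB, splitSlash_nil, outParts, outParams, convC, paramC, startswith_colon_nil,
          PySem.Chars.join_singleton]
    | cons c rest =>
      have hlen : rest.length ≤ n := Nat.le_of_succ_le_succ h
      by_cases hb : (b && (c == ':')) = true
      · -- parameter segment: b = true, c = ':'
        obtain ⟨hb1, hb2⟩ := Bool.and_eq_true_iff.mp hb
        have hc : c = ':' := by simpa using hb2
        subst hc
        have hbt : b = true := hb1
        subst hbt
        rw [scanB, if_pos hb]
        show ('{' :: (rstripColon (rest.takeWhile (· ≠ '/')) ++ '}' ::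
                (scanB (rest.dropWhile (· ≠ '/')) false).1),
              String.ofList (rstripColon (rest.takeWhile (· ≠ '/'))) ::
                (scanB (rest.dropWhile (· ≠ '/')) false).2) = _
        have hlen' : (rest.dropWhile (· ≠ '/')).length ≤ n :=
          le_trans (List.length_dropWhile_le _ _) hlen
        rw [ih (rest.dropWhile (· ≠ '/')) false hlen']
        rw [splitSlash_cons_ne ':' rest (by decide)]
        cases hdrop : rest.dropWhile (· ≠ '/') with
        | nil =>
          have hsr : splitSlash rest = [rest.takeWhile (· ≠ '/')] := by
            rw [splitSlash, dif_pos hdrop]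
          rw [hsr, splitSlash_nil]
          simp [consHead, outParts, outParams, convC, paramC,
            startswith_colon, PySem.Chars.join_singleton]
        | cons d rest2 =>
          have hd : d = '/' := by
            have := List.head_dropWhile_not (fun x => decide (x ≠ '/')) (l := rest)
            rw [hdrop] at this
            simpa using this (by simp)
          subst hd
          have hsr : splitSlash rest = rest.takeWhile (· ≠ '/') :: splitSlash rest2 := by
            rw [splitSlash, dif_neg (by rw [hdrop]; simp), hdrop]
            rfl
          rw [hsr, splitSlash_slash]
          obtain ⟨p, ps, hps⟩ := splitSlash_dest rest2
          rw [hps]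
          simp [consHead, outParts, outParams, convC, paramC, startswith_colon,
            PySem.Chars.join_cons_cons]
      · -- ordinary character
        rw [scanB, if_neg hb]
        show (c :: (scanB rest (c == '/')).1, (scanB rest (c == '/')).2) = _
        by_cases hcs : c = '/'
        · subst hcs
          simp only [beq_self_eq_true]
          rw [ih rest true hlen]
          rw [splitSlash_slash]
          obtain ⟨p, ps, hps⟩ := splitSlash_dest rest
          rw [hps]
          cases b <;>
            simp [outParts, outParams, convC, paramC, startswith_colon_nil,
              PySem.Chars.join_cons_cons]
        · have hne : (c == '/') = false := by simpa using hcs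
          rw [hne, ih rest false hlen]
          rw [splitSlash_cons_ne c rest hcs]
          obtain ⟨p, ps, hps⟩ := splitSlash_dest rest
          rw [hps]
          cases b with
          | false => simp [consHead, outParts, outParams, join_cons_head]
          | true =>
            have hcc : c ≠ ':' := by
              intro hcc
              subst hcc
              simp at hb
            simp [consHead, outParts, outParams, convC, paramC,
              startswith_colon_ne c _ hcc, join_cons_head]

theorem scan_spec (cs : List Char) (b : Bool) :
    scanB cs b = (PySem.Chars.join ['/'] (outParts b (splitSlash cs)), outParams b (splitSlash cs)) :=
  scan_spec_aux cs.length cs b (le_refl _)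

-- ===== VERDICT (by name: the statement is the Claim_ definition above) =====
theorem convert_path_params_py_spec : Claim_equal_convert_path_params_py := by
  intro path _
  unfold Spec_convert_path_params_py convert_path_params_py convert_path_params_py_alt
  simp only [splitOn_eq_splitSlash, foldl_stepA, scan_spec, outParts, outParams,
    List.nil_append]
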